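-- pv_equiv track=rewrite | github.com/WoosungMichael/Algorithm | Baekjoon/Python/brute_force/2503_numBaseball.py | ball_cnt
-- ===== SOURCE A (Python) =====
-- def ball_cnt(a, b):
--     cnt = 0
--     for i in range(len(a)):
--         for j in range(len(b)):
--             if i == j:
--                 continue
--             elif a[i] == b[j]:
--                 cnt += 1
--     return cnt
-- ===== SOURCE B (Python) =====
-- def ball_cnt(a, b):
--     freq = {}
--     for ch in b:
--         freq[ch] = freq.get(ch, 0) + 1
--     total = sum(freq.get(ch, 0) for ch in a)
--     diag = sum(1 for x, y in zip(a, b) if x == y)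
--     return total - diag
-- ===== Notes on version B (the rewrite author's own statement) =====
-- stated objective: faster
-- what changed: Replaces A's quadratic nested index loops by a frequency dictionary built once over b (total cross matches) plus a single zip pass subtracting same-position matches.
import Mathlib
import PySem

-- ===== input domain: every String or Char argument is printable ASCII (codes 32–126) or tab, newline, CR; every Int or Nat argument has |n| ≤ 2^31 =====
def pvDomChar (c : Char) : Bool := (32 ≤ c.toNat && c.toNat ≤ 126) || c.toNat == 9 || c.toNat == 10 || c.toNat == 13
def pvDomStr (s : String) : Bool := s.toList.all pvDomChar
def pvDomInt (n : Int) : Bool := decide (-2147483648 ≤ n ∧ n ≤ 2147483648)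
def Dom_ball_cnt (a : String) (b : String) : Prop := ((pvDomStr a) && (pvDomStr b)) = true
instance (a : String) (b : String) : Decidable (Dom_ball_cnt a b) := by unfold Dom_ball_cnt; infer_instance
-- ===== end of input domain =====

-- B replaces A's nested index loops by a frequency dictionary over b plus one zip pass
-- for the diagonal (objective: faster).

-- ===== PORT A =====
def ball_cnt (a : String) (b : String) : Int :=
  let la := a.toList
  let lb := b.toList
  (PySem.List.pyRange 0 (la.length : Int) 1).foldl (fun cnt i =>
    (PySem.List.pyRange 0 (lb.length : Int) 1).foldl (fun cnt j =>
      if i == j then cnt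
      else if PySem.List.pyGet? la i == PySem.List.pyGet? lb j then cnt + 1
      else cnt) cnt) 0

-- ===== PORT B =====
def ball_cnt_alt (a : String) (b : String) : Int :=
  let la := a.toList
  let lb := b.toList
  let freq : PySem.Dict Char Int :=
    lb.foldl (fun d x => d.insert x (d.getD x 0 + 1)) PySem.Dict.empty
  let total : Int := (la.map (fun ch => freq.getD ch 0)).sum
  let diag : Int := ((la.zip lb).countP (fun p => p.1 == p.2) : Nat)
  total - diag

-- ===== PRECONDITION & SPEC =====
def Spec_ball_cnt (a : String) (b : String) (out : Int) : Prop := out = ball_cnt_alt a b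
instance (a : String) (b : String) (out : Int) : Decidable (Spec_ball_cnt a b out) := by unfold Spec_ball_cnt; infer_instance

-- ===== CLAIM (what is proved, stated in full; the proofs are below) =====
def Claim_equal_ball_cnt : Prop := ∀ (a : String) (b : String), Dom_ball_cnt a b → Spec_ball_cnt a b (ball_cnt a b)

-- ===== LEMMAS AND PROOFS =====

theorem sum_map_sub_int {α : Type} (l : List α) (f g : α → Int) :
    (l.map (fun x => f x - g x)).sum = (l.map f).sum - (l.map g).sum := by
  induction l with
  | nil => simp
  | cons x t ih => simp [ih]; ring

-- a valid index read through pyGet? is the pyGetD value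
theorem pyGet?_eq_some_pyGetD {α : Type} (xs : List α) (i : Int) (d : α)
    (h0 : 0 ≤ i) (hn : i < (xs.length : Int)) :
    PySem.List.pyGet? xs i = some (PySem.List.pyGetD xs i d) := by
  have hlt : i.toNat < xs.length := by omega
  rw [show i = ((i.toNat : Nat) : Int) by omega, PySem.List.pyGet?_natCast,
    PySem.List.pyGetD_natCast, List.getElem?_eq_getElem hlt,
    List.getD_eq_getElem xs d hlt]

theorem pyGet?_eq_none_of_ge {α : Type} (xs : List α) (i : Int)
    (h : (xs.length : Int) ≤ i) :
    PySem.List.pyGet? xs i = none := by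
  simp only [PySem.List.pyGet?, PySem.List.pyIdx?]
  split_ifs with h1 h2 <;> first | rfl | omega

-- counting matches of a fixed char over all positions of lb is lb.count
theorem full_count (lb : List Char) (c : Char) :
    (PySem.List.pyRange 0 (lb.length : Int) 1).countP
      (fun j => some c == PySem.List.pyGet? lb j) = lb.count c := by
  have h1 : (PySem.List.pyRange 0 (lb.length : Int) 1).countP
      (fun j => some c == PySem.List.pyGet? lb j)
      = (PySem.List.pyRange 0 (lb.length : Int) 1).countP
        ((fun x => c == x) ∘ (fun j => PySem.List.pyGetD lb j ' ')) := by
    apply List.countP_congr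
    intro j hj
    obtain ⟨hj0, hjn⟩ := PySem.List.mem_pyRange_one.mp hj
    simp [pyGet?_eq_some_pyGetD lb j ' ' hj0 hjn]
  rw [h1, ← List.countP_map, PySem.List.map_pyGetD_pyRange_zero' lb ' ']
  unfold List.count
  apply List.countP_congr
  intro x _
  by_cases h : c = x <;> simp [h, Ne.symm]

-- inner loop of A: matches of a fixed char c against all of lb, skipping column i
theorem inner_count (lb : List Char) (c : Char) (i : Int) (h0 : 0 ≤ i) :
    ((PySem.List.pyRange 0 (lb.length : Int) 1).countP
        (fun j => !(i == j) && (some c == PySem.List.pyGet? lb j)))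
      + (if some c == PySem.List.pyGet? lb i then 1 else 0)
    = lb.count c := by
  rw [← full_count lb c]
  by_cases hm : i < (lb.length : Int)
  · rw [PySem.List.pyRange_one_append 0 i (lb.length : Int) h0 (le_of_lt hm),
      PySem.List.pyRange_one_cons hm, List.countP_append, List.countP_append,
      List.countP_cons, List.countP_cons]
    have hlo : ∀ j ∈ PySem.List.pyRange 0 i 1,
        (!(i == j) && (some c == PySem.List.pyGet? lb j))
        = (some c == PySem.List.pyGet? lb j) := by
      intro j hj
      obtain ⟨_, hji⟩ := PySem.List.mem_pyRange_one.mp hj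
      have : (i == j) = false := by simp; omega
      simp [this]
    have hhi : ∀ j ∈ PySem.List.pyRange (i + 1) (lb.length : Int) 1,
        (!(i == j) && (some c == PySem.List.pyGet? lb j))
        = (some c == PySem.List.pyGet? lb j) := by
      intro j hj
      obtain ⟨hji, _⟩ := PySem.List.mem_pyRange_one.mp hj
      have : (i == j) = false := by simp; omega
      simp [this]
    have e1 : (PySem.List.pyRange 0 i 1).countP
        (fun j => !(i == j) && (some c == PySem.List.pyGet? lb j))
        = (PySem.List.pyRange 0 i 1).countP (fun j => some c == PySem.List.pyGet? lb j) :=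
      List.countP_congr (fun j hj => by rw [hlo j hj])
    have e2 : (PySem.List.pyRange (i + 1) (lb.length : Int) 1).countP
        (fun j => !(i == j) && (some c == PySem.List.pyGet? lb j))
        = (PySem.List.pyRange (i + 1) (lb.length : Int) 1).countP (fun j => some c == PySem.List.pyGet? lb j) :=
      List.countP_congr (fun j hj => by rw [hhi j hj])
    rw [e1, e2]
    have hii : (!(i == i) && (some c == PySem.List.pyGet? lb i)) = false := by simp
    rw [hii]
    simp only [Bool.false_eq_true, if_false]
    by_cases hb : (some c == PySem.List.pyGet? lb i) = true
    · rw [if_pos hb]; omega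
    · rw [if_neg hb]
      omega
  · have hnone : PySem.List.pyGet? lb i = none := pyGet?_eq_none_of_ge lb i (by omega)
    have hind : (some c == PySem.List.pyGet? lb i) = false := by simp [hnone]
    rw [hind]
    have hcg : ∀ j ∈ PySem.List.pyRange 0 (lb.length : Int) 1,
        (!(i == j) && (some c == PySem.List.pyGet? lb j))
        = (some c == PySem.List.pyGet? lb j) := by
      intro j hj
      obtain ⟨_, hjn⟩ := PySem.List.mem_pyRange_one.mp hj
      have : (i == j) = false := by simp; omega
      simp [this]
    have e3 : (PySem.List.pyRange 0 (lb.length : Int) 1).countP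
        (fun j => !(i == j) && (some c == PySem.List.pyGet? lb j))
        = (PySem.List.pyRange 0 (lb.length : Int) 1).countP (fun j => some c == PySem.List.pyGet? lb j) :=
      List.countP_congr (fun j hj => by rw [hcg j hj])
    rw [e3]
    simp

-- diagonal over Nat indices: option agreement at index k is a zip match
theorem diag_count_nat (la : List Char) : ∀ lb : List Char,
    (List.range la.length).countP (fun k => some (la.getD k ' ') == lb[k]?)
    = (la.zip lb).countP (fun p => p.1 == p.2) := by
  induction la with
  | nil => intro lb; simp
  | cons c t ih =>
    intro lb
    cases lb with
    | nil =>
      simp [List.range_succ_eq_map, List.countP_map, Function.comp_def]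
    | cons d lb' =>
      simp only [List.length_cons, List.range_succ_eq_map, List.countP_cons,
        List.countP_map, Function.comp_def, List.getD_cons_zero, List.getD_cons_succ,
        List.getElem?_cons_zero, List.getElem?_cons_succ, List.zip_cons_cons]
      rw [ih lb']
      by_cases h : c = d <;> simp [h]

-- diagonal in A's indexing form
theorem diag_count (la lb : List Char) :
    (PySem.List.pyRange 0 (la.length : Int) 1).countP
      (fun i => some (PySem.List.pyGetD la i ' ') == PySem.List.pyGet? lb i)
    = (la.zip lb).countP (fun p => p.1 == p.2) := by
  rw [PySem.List.pyRange_zero_natCast, List.countP_map, ← diag_count_nat la lb]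
  apply List.countP_congr
  intro k _
  simp [PySem.List.pyGetD_natCast, PySem.List.pyGet?_natCast]

-- ===== VERDICT (by name: the statement is the Claim_ definition above) =====
theorem ball_cnt_spec : Claim_equal_ball_cnt := by
  intro a b _
  unfold Spec_ball_cnt ball_cnt ball_cnt_alt
  set la := a.toList with hla
  set lb := b.toList with hlb
  simp only []
  have hstep : ∀ i ∈ PySem.List.pyRange 0 (la.length : Int) 1, ∀ cnt : Int,
      (PySem.List.pyRange 0 (lb.length : Int) 1).foldl (fun cnt j =>
        if i == j then cnt
        else if PySem.List.pyGet? la i == PySem.List.pyGet? lb j then cnt + 1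
        else cnt) cnt
      = cnt + (((PySem.List.pyRange 0 (lb.length : Int) 1).countP
          (fun j => !(i == j) && (some (PySem.List.pyGetD la i ' ') == PySem.List.pyGet? lb j)) : Nat) : Int) := by
    intro i hi cnt
    obtain ⟨h0, hn⟩ := PySem.List.mem_pyRange_one.mp hi
    have hget : PySem.List.pyGet? la i = some (PySem.List.pyGetD la i ' ') :=
      pyGet?_eq_some_pyGetD la i ' ' h0 hn
    have hfun :
      (fun (cnt : Int) (j : Int) =>
        if i == j then cnt
        else if PySem.List.pyGet? la i == PySem.List.pyGet? lb j then cnt + 1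
        else cnt)
      = (fun (cnt : Int) (j : Int) =>
        if (!(i == j) && (some (PySem.List.pyGetD la i ' ') == PySem.List.pyGet? lb j)) then cnt + 1 else cnt) := by
      funext cnt j
      rw [hget]
      by_cases h1 : i == j <;> by_cases h2 : some (PySem.List.pyGetD la i ' ') == PySem.List.pyGet? lb j <;>
        simp [h1, h2]
    rw [hfun, PySem.List.foldl_if_add_one]
  rw [PySem.List.foldl_congr_mem' _ _ _ _ hstep]
  rw [PySem.List.foldl_add]
  have hmapc : ∀ i ∈ PySem.List.pyRange 0 (la.length : Int) 1,
      (((PySem.List.pyRange 0 (lb.length : Int) 1).countP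
        (fun j => !(i == j) && (some (PySem.List.pyGetD la i ' ') == PySem.List.pyGet? lb j)) : Nat) : Int)
      = ((lb.count (PySem.List.pyGetD la i ' ') : Nat) : Int)
        - (if some (PySem.List.pyGetD la i ' ') == PySem.List.pyGet? lb i then (1:Int) else 0) := by
    intro i hi
    obtain ⟨h0, _⟩ := PySem.List.mem_pyRange_one.mp hi
    have h := inner_count lb (PySem.List.pyGetD la i ' ') i h0
    by_cases hb : (some (PySem.List.pyGetD la i ' ') == PySem.List.pyGet? lb i) = true
    · rw [if_pos hb] at h ⊢; omega
    · rw [if_neg hb] at h ⊢; omega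
  rw [List.map_congr_left hmapc]
  rw [sum_map_sub_int]
  have part1 : ((PySem.List.pyRange 0 (la.length : Int) 1).map
      (fun i => ((lb.count (PySem.List.pyGetD la i ' ') : Nat) : Int))).sum
      = (la.map (fun ch => ((lb.count ch : Nat) : Int))).sum := by
    conv_rhs => rw [← PySem.List.map_pyGetD_pyRange_zero' la ' ']
    rw [List.map_map]
    simp [Function.comp_def]
  rw [part1, PySem.List.sum_map_ite_one_zero, diag_count la lb]
  have hd : ∀ ch : Char,
      ((lb.foldl (fun d x => d.insert x (d.getD x 0 + 1)) PySem.Dict.empty : PySem.Dict Char Int).getD ch 0)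
      = ((lb.count ch : Nat) : Int) := by
    intro ch
    rw [PySem.Dict.getD_foldl_insert_add_one]
    simp [PySem.Dict.getD_empty]
  simp only [hd]
  ring
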